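-- pv_equiv track=rewrite | github.com/hughcoleman/advent-of-code | 2025/04.py | removable
-- ===== SOURCE A (Python) =====
-- import itertools as it
--
-- def removable(R):
--     return set(
--         (x, y) for (x, y) in R
--             if sum(
--                 (x + dx, y + dy) in R
--                     for dx, dy in it.product((-1, 0, 1), repeat=2)
--             ) <= 4
--     )
-- ===== SOURCE B (Python) =====
-- import itertools as it
--
-- def removable(R):
--     # Scatter pass: count, for every cell, how many distinct points of R
--     # have it in their 3x3 block; then filter the points by that count.
--     S = set(R)
--     cnt = {}
--     for (x, y) in S:
--         for dx, dy in it.product((-1, 0, 1), repeat=2):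
--             q = (x + dx, y + dy)
--             cnt[q] = cnt.get(q, 0) + 1
--     return {p for p in S if cnt[p] <= 4}
-- ===== Notes on version B (the rewrite author's own statement) =====
-- stated objective: alternative
-- what changed: Replaces the per-point gather (9 membership scans of the list R for every element of R) by a single scatter pass: dedup R once, build a dict counting for each cell how many distinct points' 3x3 blocks cover it, then filter the deduped points by a dict lookup.
import Mathlib
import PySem

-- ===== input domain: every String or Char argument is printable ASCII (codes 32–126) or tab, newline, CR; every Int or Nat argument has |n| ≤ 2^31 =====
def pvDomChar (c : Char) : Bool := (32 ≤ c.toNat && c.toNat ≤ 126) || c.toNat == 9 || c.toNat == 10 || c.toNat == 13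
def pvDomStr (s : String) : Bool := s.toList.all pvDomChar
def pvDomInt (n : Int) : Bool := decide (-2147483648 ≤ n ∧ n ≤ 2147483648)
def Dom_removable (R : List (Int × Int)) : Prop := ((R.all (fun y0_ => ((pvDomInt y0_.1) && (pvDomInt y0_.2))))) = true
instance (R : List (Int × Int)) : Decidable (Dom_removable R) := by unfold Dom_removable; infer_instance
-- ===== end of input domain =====

-- B replaces A's per-point gather (9 list-membership scans per point) by one
-- scatter pass building a neighbour-count table, then a filtered lookup.

-- it.product((-1, 0, 1), repeat=2), in Python's iteration order
def pvOffsets : List (Int × Int) :=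
  [(-1,-1),(-1,0),(-1,1),(0,-1),(0,0),(0,1),(1,-1),(1,0),(1,1)]

-- ===== PORT A =====
def removable (R : List (Int × Int)) : List (Int × Int) :=
  PySem.Set.ofList (R.filter (fun p =>
    decide ((pvOffsets.map (fun d =>
      if (p.1 + d.1, p.2 + d.2) ∈ R then (1 : Int) else 0)).sum ≤ 4)))

-- ===== PORT B =====
def removable_alt (R : List (Int × Int)) : List (Int × Int) :=
  let S := PySem.Set.ofList R
  let cnt := S.foldl (fun d p =>
      pvOffsets.foldl (fun d' dd =>
        PySem.Dict.modify d' (p.1 + dd.1, p.2 + dd.2) 0 (· + 1)) d)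
    PySem.Dict.empty
  PySem.Set.ofList (S.filter (fun p => decide (PySem.Dict.getD cnt p 0 ≤ (4 : Int))))

-- ===== PRECONDITION & SPEC =====
def Spec_removable (R : List (Int × Int)) (out : List (Int × Int)) : Prop := out = removable_alt R
instance (R : List (Int × Int)) (out : List (Int × Int)) : Decidable (Spec_removable R out) := by unfold Spec_removable; infer_instance

-- ===== CLAIM (what is proved, stated in full; the proofs are below) =====
def Claim_equal_removable : Prop := ∀ (R : List (Int × Int)), Dom_removable R → Spec_removable R (removable R)

-- ===== LEMMAS AND PROOFS =====

theorem foldl_flatMap {α β γ : Type} (f : α → List β) (g : γ → β → γ) :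
    ∀ (l : List α) (init : γ),
      (l.flatMap f).foldl g init = l.foldl (fun a x => (f x).foldl g a) init := by
  intro l
  induction l with
  | nil => intro init; rfl
  | cons x xs ih => intro init; simp [List.flatMap_cons, List.foldl_append, ih]

-- the dict B builds is the counter of the flattened list of shifted cells
theorem cnt_eq_count (S : List (Int × Int)) (p : Int × Int) :
    PySem.Dict.getD
      (S.foldl (fun d q =>
        pvOffsets.foldl (fun d' dd =>
          PySem.Dict.modify d' (q.1 + dd.1, q.2 + dd.2) 0 (· + 1)) d)
        PySem.Dict.empty) p 0
    = ((S.flatMap (fun q => pvOffsets.map (fun dd => (q.1 + dd.1, q.2 + dd.2)))).count p : Int) := by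
  have h1 : ∀ (d : PySem.Dict (Int × Int) Int) (q : Int × Int),
      pvOffsets.foldl (fun d' dd =>
        PySem.Dict.modify d' (q.1 + dd.1, q.2 + dd.2) 0 (· + 1)) d
      = (pvOffsets.map (fun dd => (q.1 + dd.1, q.2 + dd.2))).foldl
          (fun d' x => PySem.Dict.modify d' x 0 (· + 1)) d := by
    intro d q; rw [List.foldl_map]
  simp only [h1]
  rw [← foldl_flatMap (fun q => pvOffsets.map (fun dd => (q.1 + dd.1, q.2 + dd.2)))
        (fun d' x => PySem.Dict.modify d' x 0 (· + 1)) S PySem.Dict.empty]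
  rw [PySem.Dict.getD_foldl_modify_add_one, PySem.Dict.getD_empty]
  ring

-- count in a mapped list as a sum of indicator terms
theorem count_map_eq_sum {α β : Type} [BEq β] [LawfulBEq β] [DecidableEq β] (g : α → β) (l : List α) (p : β) :
    (((l.map g).count p : Nat) : Int)
    = (l.map (fun d => if g d = p then (1 : Int) else 0)).sum := by
  induction l with
  | nil => simp
  | cons x xs ih =>
    simp only [List.map_cons, List.count_cons, List.sum_cons, ← ih, beq_iff_eq]
    push_cast
    split <;> ring

-- pvOffsets is closed under negation: summing g(-d) over it = summing g(d)
theorem sum_neg_offsets (g : Int × Int → Int) :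
    (pvOffsets.map (fun d => g (-d.1, -d.2))).sum = (pvOffsets.map g).sum := by
  simp only [pvOffsets, List.map_cons, List.map_nil, List.sum_cons, List.sum_nil]
  norm_num
  ring

-- count of p among the 9 cells shifted from q = indicator sum over offsets
theorem nine_count (q p : Int × Int) :
    (((pvOffsets.map (fun dd => (q.1 + dd.1, q.2 + dd.2))).count p : Nat) : Int)
    = (pvOffsets.map (fun d => if (p.1 + d.1, p.2 + d.2) = q then (1 : Int) else 0)).sum := by
  rw [count_map_eq_sum]
  rw [← sum_neg_offsets (fun d => if (q.1 + d.1, q.2 + d.2) = p then (1 : Int) else 0)]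
  refine congrArg List.sum (List.map_congr_left (fun d _ => ?_))
  refine if_congr ?_ rfl rfl
  obtain ⟨q1, q2⟩ := q; obtain ⟨p1, p2⟩ := p; obtain ⟨d1, d2⟩ := d
  simp only [Prod.mk.injEq]
  omega

-- for a nodup list, count of flatMap of shifts = the 9-term membership sum
theorem count_flatMap_nodup (S : List (Int × Int)) (h : S.Nodup) (p : Int × Int) :
    ((S.flatMap (fun q => pvOffsets.map (fun dd => (q.1 + dd.1, q.2 + dd.2)))).count p : Int)
    = (pvOffsets.map (fun d => if (p.1 + d.1, p.2 + d.2) ∈ S then (1 : Int) else 0)).sum := by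
  induction S with
  | nil => simp [pvOffsets]
  | cons s S' ih =>
    obtain ⟨hs, hnd⟩ := List.nodup_cons.mp h
    rw [List.flatMap_cons, List.count_append]
    push_cast
    rw [nine_count]
    have ihx := ih hnd
    push_cast at ihx
    rw [ihx]
    rw [← List.sum_map_add]
    refine congrArg List.sum (List.map_congr_left (fun d _ => ?_))
    by_cases h1 : (p.1 + d.1, p.2 + d.2) = s <;>
      by_cases h2 : (p.1 + d.1, p.2 + d.2) ∈ S' <;>
      simp_all [List.mem_cons]

-- dedup commutes with a pointwise filter
theorem ofList_filter (q : (Int × Int) → Bool) (R : List (Int × Int)) :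
    PySem.Set.ofList (R.filter q) = (PySem.Set.ofList R).filter q := by
  induction R with
  | nil => simp [PySem.Set.ofList_nil]
  | cons x xs ih =>
    by_cases hx : q x
    · rw [List.filter_cons_of_pos hx, PySem.Set.ofList_cons, PySem.Set.ofList_cons,
        List.filter_cons_of_pos hx, ih]
      simp only [PySem.Set.discard, List.filter_filter]
      have hfg : (fun a => (!a == x) && q a) = (fun a => q a && (!a == x)) := by
        funext a; exact Bool.and_comm _ _
      rw [hfg]
    · rw [List.filter_cons_of_neg (by simpa using hx), PySem.Set.ofList_cons,
        List.filter_cons_of_neg (by simpa using hx), ih]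
      simp only [PySem.Set.discard, List.filter_filter]
      refine List.filter_congr (fun y _ => ?_)
      by_cases hy : y = x
      · subst hy; simp_all
      · simp_all

-- ===== VERDICT (by name: the statement is the Claim_ definition above) =====
theorem removable_spec : Claim_equal_removable := by
  intro R _
  unfold Spec_removable removable removable_alt
  dsimp only
  rw [ofList_filter (fun p =>
        decide ((pvOffsets.map (fun d =>
          if (p.1 + d.1, p.2 + d.2) ∈ R then (1 : Int) else 0)).sum ≤ 4)) R]
  rw [ofList_filter (fun p =>
        decide (PySem.Dict.getD
          ((PySem.Set.ofList R).foldl (fun d p =>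
            pvOffsets.foldl (fun d' dd =>
              PySem.Dict.modify d' (p.1 + dd.1, p.2 + dd.2) 0 (· + 1)) d)
            PySem.Dict.empty) p 0 ≤ (4 : Int))) (PySem.Set.ofList R),
      PySem.Set.ofList_ofList]
  refine List.filter_congr (fun p hp => ?_)
  have h1 := cnt_eq_count (PySem.Set.ofList R) p
  have h2 := count_flatMap_nodup (PySem.Set.ofList R) (PySem.Set.nodup_ofList R) p
  rw [h1, h2]
  simp [PySem.Set.mem_ofList]
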